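-- pv_equiv track=rewrite | github.com/Lemi-in/Codeforces-daily | B_Code_For_1.py | is_one
-- ===== SOURCE A (Python) =====
-- def is_one(pos, target, num):
--     if num < 2:
--         return num
--     if pos + 1 == 2 * target:
--         return num % 2
--     num //= 2
--     pos //= 2
--     if target > pos + 1:
--         target -= (pos + 1)
--     return is_one(pos, target, num)
-- ===== SOURCE B (Python) =====
-- def is_one(pos, target, num):
--     if num < 2:
--         return num
--     for j in range(num.bit_length() - 1):
--         if pos + 1 == 2 * target:
--             return (num >> j) & 1
--         pos //= 2
--         if target > pos + 1:
--             target -= pos + 1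
--     return 1
-- ===== Notes on version B (the rewrite author's own statement) =====
-- stated objective: alternative
-- what changed: Replaces the tail recursion that halves num each step by a bounded for-loop over bit positions: num is never mutated, the loop length is num.bit_length()-1, and the answer is read off as bit j of the original num ((num >> j) & 1) at the first step where pos+1 == 2*target, defaulting to 1 (the top bit) when no step fires.
import Mathlib
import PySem

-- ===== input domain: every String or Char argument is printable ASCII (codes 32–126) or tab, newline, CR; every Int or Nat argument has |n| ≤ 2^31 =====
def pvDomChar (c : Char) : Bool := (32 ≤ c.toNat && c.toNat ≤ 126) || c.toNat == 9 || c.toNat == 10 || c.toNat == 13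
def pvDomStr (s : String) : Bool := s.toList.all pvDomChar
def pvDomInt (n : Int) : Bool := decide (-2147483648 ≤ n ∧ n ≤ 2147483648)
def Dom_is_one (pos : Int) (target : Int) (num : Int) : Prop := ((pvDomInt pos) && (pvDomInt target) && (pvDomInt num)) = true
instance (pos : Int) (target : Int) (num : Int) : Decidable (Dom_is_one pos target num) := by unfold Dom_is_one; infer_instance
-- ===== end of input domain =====

-- B replaces A's halving tail recursion by a bounded loop over bit positions of the
-- unchanged num (objective: alternative decomposition, same asymptotic cost).

-- ===== PORT A =====
-- literal transliteration of A's tail recursion; terminates since num is floor-halved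
def is_one (pos : Int) (target : Int) (num : Int) : Int :=
  if num < 2 then num
  else if pos + 1 == 2 * target then PySem.Int.mod num 2
  else
    let num' := PySem.Int.floordiv num 2
    let pos' := PySem.Int.floordiv pos 2
    let target' := if target > pos' + 1 then target - (pos' + 1) else target
    is_one pos' target' num'
termination_by num.toNat
decreasing_by
  have := PySem.Int.floordiv_eq_ediv_of_pos (a := num) (b := 2) (by omega)
  simp only [this]
  omega

-- ===== PORT B =====
-- the for-loop of Source B: j counts up, fuel = remaining iterations (range length)
def isOneScan (pos : Int) (target : Int) (num : Int) (j : Nat) (fuel : Nat) : Int :=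
  match fuel with
  | 0 => 1
  | f + 1 =>
    if pos + 1 == 2 * target then PySem.Int.band (num >>> j) 1
    else
      let pos' := PySem.Int.floordiv pos 2
      let target' := if target > pos' + 1 then target - (pos' + 1) else target
      isOneScan pos' target' num (j + 1) f

-- num.bit_length() - 1 is PySem.Int.bitLength num - 1 (exact for the num ≥ 2 branch)
def is_one_alt (pos : Int) (target : Int) (num : Int) : Int :=
  if num < 2 then num
  else isOneScan pos target num 0 (PySem.Int.bitLength num - 1)

-- ===== PRECONDITION & SPEC =====
def Spec_is_one (pos : Int) (target : Int) (num : Int) (out : Int) : Prop := out = is_one_alt pos target num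
instance (pos : Int) (target : Int) (num : Int) (out : Int) : Decidable (Spec_is_one pos target num out) := by unfold Spec_is_one; infer_instance

-- ===== CLAIM (what is proved, stated in full; the proofs are below) =====
def Claim_equal_is_one : Prop := ∀ (pos : Int) (target : Int) (num : Int), Dom_is_one pos target num → Spec_is_one pos target num (is_one pos target num)

-- ===== LEMMAS AND PROOFS =====

theorem floordiv_two_eq_shift (n : Int) : PySem.Int.floordiv n 2 = n >>> (1:Nat) := by
  rw [PySem.Int.floordiv_eq_ediv_of_pos (a := n) (b := 2) (by omega)]
  simp [Int.shiftRight_eq_div_pow]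

theorem shift_succ (n : Int) (j : Nat) : n >>> (j+1) = (n >>> (1:Nat)) >>> j := by
  simp [Int.shiftRight_eq_div_pow, pow_succ, Int.ediv_ediv_of_nonneg]
  ring_nf

theorem bitLength_ge_two (n : Int) (h : 2 ≤ n) : 2 ≤ PySem.Int.bitLength n := by
  have hlt := PySem.Int.lt_two_pow_bitLength n
  have h2 : 2 ≤ n.natAbs := by omega
  by_contra hle
  push Not at hle
  have hpow : (2:Nat) ^ PySem.Int.bitLength n ≤ 2 ^ 1 :=
    Nat.pow_le_pow_right (by norm_num) (by omega)
  omega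

-- shifting the scan index down one step is halving num
theorem isOneScan_shift (f : Nat) : ∀ (pos target num : Int) (j : Nat),
    isOneScan pos target num (j+1) f
      = isOneScan pos target (PySem.Int.floordiv num 2) j f := by
  induction f with
  | zero => intro pos target num j; simp [isOneScan]
  | succ f ih =>
    intro pos target num j
    simp only [isOneScan]
    split
    · rw [floordiv_two_eq_shift, shift_succ]
    · exact ih _ _ _ _

theorem is_one_eq_alt (pos target num : Int) : is_one pos target num = is_one_alt pos target num := by
  induction pos, target, num using is_one.induct with
  | case1 pos target num hlt =>
    simp [is_one, is_one_alt, hlt]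
  | case2 pos target num hlt hcond =>
    have h2 : 2 ≤ num := by omega
    have hbl := bitLength_ge_two num h2
    rw [is_one, is_one_alt]
    simp only [hlt, if_false, hcond, if_true]
    obtain ⟨f, hf⟩ : ∃ f, PySem.Int.bitLength num - 1 = f + 1 := ⟨PySem.Int.bitLength num - 2, by omega⟩
    rw [hf]
    simp [isOneScan, hcond, PySem.Int.band_one]
  | case3 pos target num hlt hcond nh ph th ih =>
    simp only [nh, ph, th, dite_eq_ite] at ih
    have h2 : 2 ≤ num := by omega
    have hnum' : 1 ≤ PySem.Int.floordiv num 2 := by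
      rw [PySem.Int.floordiv_eq_ediv_of_pos (a := num) (b := 2) (by omega)]; omega
    have hbl : PySem.Int.bitLength num
        = PySem.Int.bitLength (PySem.Int.floordiv num 2) + 1 :=
      PySem.Int.bitLength_of_pos (n := num) (by omega)
    rw [is_one, is_one_alt]
    rw [if_neg hlt, if_neg hlt, if_neg hcond]
    rw [ih, is_one_alt]
    set num' := PySem.Int.floordiv num 2 with hnum'def
    by_cases hsmall : num' < 2
    · -- num' = 1: the remaining fuel is exactly one step, loop falls through to 1
      have h1 : num' = 1 := by omega
      have hb1 : PySem.Int.bitLength num' = 1 := by rw [h1]; decide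
      rw [hbl, hb1]
      simp [isOneScan, hcond, h1]
    · have hbl2 := bitLength_ge_two num' (by omega)
      obtain ⟨f, hf⟩ : ∃ f, PySem.Int.bitLength num' - 1 = f + 1 := ⟨PySem.Int.bitLength num' - 2, by omega⟩
      have hblnum : PySem.Int.bitLength num - 1 = (f + 1) + 1 := by omega
      rw [hblnum]
      conv_rhs => rw [isOneScan]
      rw [if_neg hcond, isOneScan_shift, ← hf, if_neg hsmall]

-- ===== VERDICT (by name: the statement is the Claim_ definition above) =====
theorem is_one_spec : Claim_equal_is_one := by
  intro pos target num _
  unfold Spec_is_one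
  exact is_one_eq_alt pos target num
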